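-- pv_equiv track=rewrite | github.com/PacktPublishing/Advanced-Data-Structures-and-Algorithms-in-Python | Section 1/5_modulos.py | in_n_cubed
-- ===== SOURCE A (Python) =====
-- def in_n_cubed(array, k):
--     n = len(array)
--     min_len = n + 1
--     for i in range(n):
--         for j in range(i, n):
--             if sum(array[i:j+1]) % k == 0 and j - i + 1 < min_len:
--                 min_len = j - i + 1
--
--     return min_len
-- ===== SOURCE B (Python) =====
-- def in_n_cubed(array, k):
--     # Prefix sums mod k: shortest subarray ending at j is j minus the most
--     # recent earlier prefix index with the same residue.
--     n = len(array)
--     best = n + 1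
--     last = {0: 0}
--     s = 0
--     j = 0
--     for x in array:
--         j += 1
--         s = (s + x) % k
--         if s in last:
--             d = j - last[s]
--             if d < best:
--                 best = d
--         last[s] = j
--     return best
-- ===== Notes on version B (the rewrite author's own statement) =====
-- stated objective: faster
-- what changed: Replaced the cubic scan over all (i,j) subarrays with re-summed slices by a single pass over prefix sums modulo k that keeps the most recent index of each residue in a dict.
import Mathlib
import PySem

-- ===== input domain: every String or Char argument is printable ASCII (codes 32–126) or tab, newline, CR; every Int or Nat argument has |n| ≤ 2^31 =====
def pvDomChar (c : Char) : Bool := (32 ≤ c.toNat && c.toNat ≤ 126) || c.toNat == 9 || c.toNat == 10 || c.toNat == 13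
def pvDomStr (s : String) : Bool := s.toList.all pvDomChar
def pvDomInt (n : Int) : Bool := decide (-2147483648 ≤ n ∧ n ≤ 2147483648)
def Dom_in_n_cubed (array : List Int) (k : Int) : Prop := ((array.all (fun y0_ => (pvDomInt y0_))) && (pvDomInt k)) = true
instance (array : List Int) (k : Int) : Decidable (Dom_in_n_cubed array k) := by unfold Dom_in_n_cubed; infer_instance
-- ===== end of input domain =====

-- B replaces A's cubic scan of all subarrays by a single pass over prefix sums
-- modulo k, remembering the most recent index of each residue (objective: faster).

-- ===== PORT A =====
-- n = len(array) is inlined as (array.length : Int)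
def in_n_cubed (array : List Int) (k : Int) : Int :=
  (PySem.List.pyRange 0 (array.length : Int) 1).foldl (fun min_len i =>
    (PySem.List.pyRange i (array.length : Int) 1).foldl (fun min_len j =>
      if PySem.Int.mod (PySem.List.slice array (some i) (some (j + 1))).sum k = 0 ∧
          j - i + 1 < min_len then j - i + 1 else min_len) min_len) ((array.length : Int) + 1)

-- ===== PORT B =====
-- loop body of Source B's single pass: state (best, last, s, j)
def bStep (k : Int) (st : Int × PySem.Dict Int Int × Int × Int) (x : Int) :
    Int × PySem.Dict Int Int × Int × Int :=
  let best := st.1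
  let last := st.2.1
  let j := st.2.2.2 + 1
  let s := PySem.Int.mod (st.2.2.1 + x) k
  let best :=
    if last.contains s then
      let d := j - last.getD s 0
      if d < best then d else best
    else best
  (best, last.insert s j, s, j)

def in_n_cubed_alt (array : List Int) (k : Int) : Int :=
  (array.foldl (bStep k) ((array.length : Int) + 1, (PySem.Dict.empty).insert 0 0, 0, 0)).1

-- ===== PRECONDITION & SPEC =====
-- Pre_ excludes exactly k = 0, on which Python's '%' raises ZeroDivisionError.
def Pre_in_n_cubed (array : List Int) (k : Int) : Prop := k ≠ 0
instance (array : List Int) (k : Int) : Decidable (Pre_in_n_cubed array k) := by unfold Pre_in_n_cubed; infer_instance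

def pvWitness_in_n_cubed : List Int × Int := ([3, 1, 2], 3)

def Spec_in_n_cubed (array : List Int) (k : Int) (out : Int) : Prop := out = in_n_cubed_alt array k
instance (array : List Int) (k : Int) (out : Int) : Decidable (Spec_in_n_cubed array k out) := by unfold Spec_in_n_cubed; infer_instance

-- ===== CLAIM (what is proved, stated in full; the proofs are below) =====
def Claim_equal_in_n_cubed : Prop := ∀ (array : List Int) (k : Int), Dom_in_n_cubed array k → Pre_in_n_cubed array k → Spec_in_n_cubed array k (in_n_cubed array k)


-- ===== LEMMAS AND PROOFS =====

-- Python-mod facts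
lemma pymod_eq_iff (a b k : Int) (hk : k ≠ 0) :
    PySem.Int.mod a k = PySem.Int.mod b k ↔ k ∣ (a - b) := by
  have ha := PySem.Int.floordiv_mul_add_mod a k
  have hb := PySem.Int.floordiv_mul_add_mod b k
  constructor
  · intro h
    exact ⟨PySem.Int.floordiv a k - PySem.Int.floordiv b k, by linarith⟩
  · rintro ⟨c, hc⟩
    have hdvd : k ∣ (PySem.Int.mod a k - PySem.Int.mod b k) :=
      ⟨c - PySem.Int.floordiv a k + PySem.Int.floordiv b k, by linarith⟩
    have h0 : PySem.Int.mod a k - PySem.Int.mod b k = 0 := by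
      rcases lt_or_gt_of_ne hk with hneg | hpos
      · have b1 := PySem.Int.mod_neg_bounds a hneg
        have b2 := PySem.Int.mod_neg_bounds b hneg
        exact Int.eq_zero_of_dvd_of_natAbs_lt_natAbs hdvd (by omega)
      · have b1 := PySem.Int.mod_nonneg a hpos
        have b2 := PySem.Int.mod_nonneg b hpos
        have b3 := PySem.Int.mod_lt a hpos
        have b4 := PySem.Int.mod_lt b hpos
        exact Int.eq_zero_of_dvd_of_natAbs_lt_natAbs hdvd (by omega)
    omega

-- prefix sums and prefix residues
def pvS (array : List Int) (t : Nat) : Int := (array.take t).sum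
def pvR (array : List Int) (k : Int) (t : Nat) : Int := PySem.Int.mod (pvS array t) k

lemma pvS_succ (array : List Int) (t : Nat) (x : Int) (l2 : List Int)
    (h : array.drop t = x :: l2) : pvS array (t + 1) = pvS array t + x := by
  unfold pvS
  rw [List.take_add, h]
  simp

lemma slice_sum (array : List Int) (a b : Nat) (hab : a ≤ b) :
    (PySem.List.slice array (some (a : Int)) (some (b : Int))).sum =
      pvS array b - pvS array a := by
  rw [PySem.List.slice_natCast]
  have h : List.take b array = List.take a array ++ List.take (b - a) (List.drop a array) := by
    rw [← List.take_add]; congr 1; omega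
  have : pvS array b = pvS array a + (List.take (b - a) (List.drop a array)).sum := by
    unfold pvS; rw [h, List.sum_append]
  omega

-- a subarray pair: indices i < j ≤ n of equal prefix residue; its length is j - i
def Good (array : List Int) (k : Int) (i j : Nat) : Prop :=
  i < j ∧ j ≤ array.length ∧ pvR array k i = pvR array k j

-- the value both programs compute: min(n+1, min length of a Good pair)
def BestVal (array : List Int) (k : Int) (x : Int) : Prop :=
  (x = (array.length : Int) + 1 ∨ ∃ i j : Nat, Good array k i j ∧ x = (j : Int) - (i : Int))
  ∧ x ≤ (array.length : Int) + 1
  ∧ ∀ i j : Nat, Good array k i j → x ≤ (j : Int) - (i : Int)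

lemma bestVal_unique (array : List Int) (k : Int) (x y : Int)
    (hx : BestVal array k x) (hy : BestVal array k y) : x = y := by
  obtain ⟨hx1, hx2, hx3⟩ := hx
  obtain ⟨hy1, hy2, hy3⟩ := hy
  apply le_antisymm
  · rcases hy1 with rfl | ⟨i, j, hg, rfl⟩
    · exact hx2
    · exact hx3 i j hg
  · rcases hx1 with rfl | ⟨i, j, hg, rfl⟩
    · exact hy2
    · exact hy3 i j hg

-- generic characterisation of a "keep the smaller candidate" fold
lemma foldl_sel_char {α : Type} (f : Int → α → Int) (Q : α → Int → Prop)
    (h1 : ∀ c x, f c x ≤ c)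
    (h2 : ∀ c x, f c x = c ∨ Q x (f c x))
    (h3 : ∀ c x v, Q x v → f c x ≤ v) :
    ∀ (l : List α) (c : Int),
      (l.foldl f c = c ∨ ∃ x ∈ l, Q x (l.foldl f c)) ∧
      l.foldl f c ≤ c ∧
      ∀ x ∈ l, ∀ v, Q x v → l.foldl f c ≤ v := by
  intro l
  induction l with
  | nil => simp
  | cons y l ih =>
    intro c
    have IH := ih (f c y)
    refine ⟨?_, ?_, ?_⟩
    · rcases IH.1 with h | h
      · rcases h2 c y with h' | h'
        · left; rw [List.foldl_cons, h, h']
        · right; exact ⟨y, List.mem_cons_self, by rw [List.foldl_cons, h]; exact h'⟩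
      · obtain ⟨x, hx, hQ⟩ := h
        exact Or.inr ⟨x, List.mem_cons_of_mem y hx, hQ⟩
    · exact le_trans IH.2.1 (h1 c y)
    · intro x hx v hQ
      rcases List.mem_cons.mp hx with rfl | hx
      · exact le_trans IH.2.1 (h3 c x v hQ)
      · exact IH.2.2 x hx v hQ

-- A's divisibility test, rephrased through prefix residues
lemma condA_iff (array : List Int) (k : Int) (hk : k ≠ 0) (i j : Int)
    (hi : 0 ≤ i) (hij : i ≤ j) (hj : j < (array.length : Int)) :
    (PySem.Int.mod (PySem.List.slice array (some i) (some (j + 1))).sum k = 0 ↔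
      pvR array k i.toNat = pvR array k (j.toNat + 1)) := by
  obtain ⟨a, rfl⟩ : ∃ a : Nat, i = (a : Int) := ⟨i.toNat, by omega⟩
  obtain ⟨b, rfl⟩ : ∃ b : Nat, j = (b : Int) := ⟨j.toNat, by omega⟩
  have h1 : (b : Int) + 1 = ((b + 1 : Nat) : Int) := by push_cast; ring
  rw [h1, slice_sum array a (b + 1) (by omega), PySem.Int.mod_eq_zero_iff_dvd]
  simp only [Int.toNat_natCast]
  rw [pvR, pvR, eq_comm, pymod_eq_iff _ _ _ hk]

theorem A_best (array : List Int) (k : Int) (hk : k ≠ 0) :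
    BestVal array k (in_n_cubed array k) := by
  have hinner := fun (i : Int) => foldl_sel_char
    (fun m j => if PySem.Int.mod (PySem.List.slice array (some i) (some (j + 1))).sum k = 0 ∧
        j - i + 1 < m then j - i + 1 else m)
    (fun j v => PySem.Int.mod (PySem.List.slice array (some i) (some (j + 1))).sum k = 0 ∧
        v = j - i + 1)
    (by intro c x; dsimp only; split_ifs with h
        · exact le_of_lt h.2
        · exact le_refl c)
    (by intro c x; dsimp only; split_ifs with h
        · exact Or.inr ⟨h.1, rfl⟩
        · exact Or.inl rfl)
    (by intro c x v hv; dsimp only; split_ifs with h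
        · omega
        · have : ¬ (x - i + 1 < c) := fun hlt => h ⟨hv.1, hlt⟩
          omega)
  have houter := foldl_sel_char
    (fun m i => (PySem.List.pyRange i (array.length : Int) 1).foldl
      (fun m j => if PySem.Int.mod (PySem.List.slice array (some i) (some (j + 1))).sum k = 0 ∧
          j - i + 1 < m then j - i + 1 else m) m)
    (fun i v => ∃ j ∈ PySem.List.pyRange i (array.length : Int) 1,
      PySem.Int.mod (PySem.List.slice array (some i) (some (j + 1))).sum k = 0 ∧ v = j - i + 1)
    (by intro c i; exact (hinner i (PySem.List.pyRange i (array.length : Int) 1) c).2.1)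
    (by intro c i
        rcases (hinner i (PySem.List.pyRange i (array.length : Int) 1) c).1 with h | h
        · exact Or.inl h
        · exact Or.inr h)
    (by intro c i v hv
        obtain ⟨j, hj, hP, rfl⟩ := hv
        exact (hinner i (PySem.List.pyRange i (array.length : Int) 1) c).2.2 j hj _ ⟨hP, rfl⟩)
    (PySem.List.pyRange 0 (array.length : Int) 1) ((array.length : Int) + 1)
  unfold in_n_cubed
  refine ⟨?_, houter.2.1, ?_⟩
  · rcases houter.1 with h | ⟨i, hiMem, j, hjMem, hP, hEq⟩
    · exact Or.inl h
    · rw [PySem.List.mem_pyRange_one] at hiMem hjMem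
      refine Or.inr ⟨i.toNat, j.toNat + 1,
        ⟨by omega, by omega, (condA_iff array k hk i j hiMem.1 hjMem.1 hjMem.2).mp hP⟩, ?_⟩
      push_cast
      omega
  · rintro a b ⟨hab, hbn, hR⟩
    have h1 : (a : Int) ∈ PySem.List.pyRange 0 (array.length : Int) 1 :=
      PySem.List.mem_pyRange_one.mpr ⟨by omega, by omega⟩
    have h2 : ((b : Int) - 1) ∈ PySem.List.pyRange (a : Int) (array.length : Int) 1 :=
      PySem.List.mem_pyRange_one.mpr ⟨by omega, by omega⟩
    have hP : PySem.Int.mod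
        (PySem.List.slice array (some (a : Int)) (some (((b : Int) - 1) + 1))).sum k = 0 := by
      rw [condA_iff array k hk (a : Int) ((b : Int) - 1) (by omega) (by omega) (by omega)]
      have e1 : ((a : Int)).toNat = a := by omega
      have e2 : ((b : Int) - 1).toNat + 1 = b := by omega
      rw [e1, e2]
      exact hR
    have := houter.2.2 (a : Int) h1 ((b : Int) - (a : Int)) ⟨(b : Int) - 1, h2, hP, by ring⟩
    exact this

-- ===== B side =====

-- best over pairs whose right end is ≤ t
def BestUpTo (array : List Int) (k : Int) (t : Nat) (x : Int) : Prop :=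
  (x = (array.length : Int) + 1 ∨
    ∃ i j : Nat, i < j ∧ j ≤ t ∧ pvR array k i = pvR array k j ∧ x = (j : Int) - (i : Int))
  ∧ x ≤ (array.length : Int) + 1
  ∧ ∀ i j : Nat, i < j → j ≤ t → pvR array k i = pvR array k j → x ≤ (j : Int) - (i : Int)

-- the loop invariant of B after the first t elements
def BInv (array : List Int) (k : Int) (t : Nat)
    (st : Int × PySem.Dict Int Int × Int × Int) : Prop :=
  st.2.2.2 = (t : Int) ∧ st.2.2.1 = pvR array k t ∧
  (∀ r : Int, (∃ i, i ≤ t ∧ pvR array k i = r) →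
    st.2.1.get? r = some ((Nat.findGreatest (fun i => pvR array k i = r) t : Nat) : Int)) ∧
  (∀ r : Int, (∀ i, i ≤ t → pvR array k i ≠ r) → st.2.1.get? r = none) ∧
  BestUpTo array k t st.1

lemma bstep_inv (array : List Int) (k : Int) (hk : k ≠ 0) (t : Nat) (x : Int)
    (l2 : List Int) (st : Int × PySem.Dict Int Int × Int × Int)
    (hdrop : array.drop t = x :: l2) (hinv : BInv array k t st) :
    BInv array k (t + 1) (bStep k st x) := by
  obtain ⟨best, last, s, jj⟩ := st
  obtain ⟨hjc, hsc, hsome, hnone, hbest⟩ := hinv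
  dsimp at hjc hsc hsome hnone hbest
  subst hjc
  subst hsc
  have htlen : t < array.length := by
    by_contra h
    push Not at h
    rw [List.drop_eq_nil_of_le h] at hdrop
    simp at hdrop
  have hS := pvS_succ array t x l2 hdrop
  have hR1 : pvR array k (t + 1) = PySem.Int.mod (pvR array k t + x) k := by
    unfold pvR
    rw [hS]
    refine (pymod_eq_iff _ _ _ hk).mpr ?_
    refine ⟨PySem.Int.floordiv (pvS array t) k, ?_⟩
    have h := PySem.Int.floordiv_mul_add_mod (pvS array t) k
    have h2 := mul_comm (PySem.Int.floordiv (pvS array t) k) k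
    linarith
  unfold bStep
  dsimp only
  rw [← hR1]
  obtain ⟨hb1, hb2, hb3⟩ := hbest
  refine ⟨by dsimp only; omega, rfl, ?_, ?_, ?_⟩
  · -- most-recent-index map: keys present
    rintro r ⟨i, hi, hRi⟩
    dsimp only
    rw [PySem.Dict.get?_insert]
    by_cases hrr : r = pvR array k (t + 1)
    · subst hrr
      rw [if_pos rfl]
      have hg : Nat.findGreatest (fun i => pvR array k i = pvR array k (t + 1)) (t + 1) = t + 1 := by
        rw [Nat.findGreatest_succ, if_pos rfl]
      rw [hg]
      push_cast
      ring_nf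
    · rw [if_neg hrr]
      have hi' : i ≤ t := by
        rcases Nat.lt_or_ge i (t + 1) with h | h
        · omega
        · exfalso
          have : i = t + 1 := by omega
          subst this
          exact hrr hRi.symm
      rw [hsome r ⟨i, hi', hRi⟩]
      have hg : Nat.findGreatest (fun i => pvR array k i = r) (t + 1) =
          Nat.findGreatest (fun i => pvR array k i = r) t := by
        rw [Nat.findGreatest_succ,
          if_neg (fun (h : pvR array k (t + 1) = r) => hrr h.symm)]
      rw [hg]
  · -- most-recent-index map: keys absent
    intro r hr
    dsimp only
    have hrr : r ≠ pvR array k (t + 1) := by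
      intro h
      exact hr (t + 1) (le_refl _) h.symm
    rw [PySem.Dict.get?_insert, if_neg hrr]
    exact hnone r (fun i hi => hr i (by omega))
  · -- the running best
    dsimp only
    by_cases hcon : last.contains (pvR array k (t + 1))
    · -- a previous prefix with this residue exists
      have hex : ∃ i, i ≤ t ∧ pvR array k i = pvR array k (t + 1) := by
        by_contra h
        push Not at h
        rw [PySem.Dict.contains_eq_isSome_get?, hnone _ (fun i hi => h i hi)] at hcon
        simp at hcon
      have hget := hsome _ hex
      have hgetD : last.getD (pvR array k (t + 1)) 0 =
          ((Nat.findGreatest (fun i => pvR array k i = pvR array k (t + 1)) t : Nat) : Int) :=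
        PySem.Dict.getD_of_get?_eq_some last 0 hget
      set m := Nat.findGreatest (fun i => pvR array k i = pvR array k (t + 1)) t with hm
      have hmP : pvR array k m = pvR array k (t + 1) := by
        obtain ⟨i, hi, hRi⟩ := hex
        exact Nat.findGreatest_spec (P := fun i => pvR array k i = pvR array k (t + 1)) hi hRi
      have hmle : m ≤ t := Nat.findGreatest_le t
      rw [hcon]
      simp only [if_true]
      rw [hgetD]
      have hboundnew : ∀ i : Nat, i ≤ t → pvR array k i = pvR array k (t + 1) →
          ((t : Int) + 1 - (m : Int)) ≤ ((t : Int) + 1 - (i : Int)) := by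
        intro i hi hRi
        have : i ≤ m := Nat.le_findGreatest hi hRi
        omega
      by_cases hlt : (t : Int) + 1 - (m : Int) < best
      · rw [if_pos hlt]
        refine ⟨Or.inr ⟨m, t + 1, by omega, by omega, hmP, by push_cast; ring⟩, by linarith, ?_⟩
        intro i j hij hjle hRij
        rcases Nat.lt_or_ge j (t + 1) with hjt | hjt
        · have := hb3 i j hij (by omega) hRij
          linarith
        · have hj1 : j = t + 1 := by omega
          subst hj1
          have := hboundnew i (by omega) hRij
          push_cast
          omega
      · rw [if_neg hlt]
        refine ⟨?_, hb2, ?_⟩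
        · rcases hb1 with h | ⟨i, j, h1, h2, h3, h4⟩
          · exact Or.inl h
          · exact Or.inr ⟨i, j, h1, by omega, h3, h4⟩
        · intro i j hij hjle hRij
          rcases Nat.lt_or_ge j (t + 1) with hjt | hjt
          · exact hb3 i j hij (by omega) hRij
          · have hj1 : j = t + 1 := by omega
            subst hj1
            have := hboundnew i (by omega) hRij
            push_cast
            omega
    · -- no previous prefix has this residue
      have hnoex : ∀ i, i ≤ t → pvR array k i ≠ pvR array k (t + 1) := by
        intro i hi hR
        rw [PySem.Dict.contains_eq_isSome_get?, hsome _ ⟨i, hi, hR⟩] at hcon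
        simp at hcon
      rw [Bool.not_eq_true] at hcon
      rw [hcon]
      simp only [Bool.false_eq_true, if_false]
      refine ⟨?_, hb2, ?_⟩
      · rcases hb1 with h | ⟨i, j, h1, h2, h3, h4⟩
        · exact Or.inl h
        · exact Or.inr ⟨i, j, h1, by omega, h3, h4⟩
      · intro i j hij hjle hRij
        rcases Nat.lt_or_ge j (t + 1) with hjt | hjt
        · exact hb3 i j hij (by omega) hRij
        · have hj1 : j = t + 1 := by omega
          subst hj1
          exact absurd hRij (hnoex i (by omega))

lemma bfold_inv (array : List Int) (k : Int) (hk : k ≠ 0) :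
    ∀ (l : List Int) (t : Nat) (st : Int × PySem.Dict Int Int × Int × Int),
      array.drop t = l → BInv array k t st →
      BInv array k (t + l.length) (l.foldl (bStep k) st) := by
  intro l
  induction l with
  | nil => intro t st _ h; simpa using h
  | cons x l2 ih =>
    intro t st hdrop hinv
    have hdrop2 : array.drop (t + 1) = l2 := by
      have := congrArg List.tail hdrop
      simpa [List.tail_drop] using this
    have step := bstep_inv array k hk t x l2 st hdrop hinv
    have := ih (t + 1) (bStep k st x) hdrop2 step
    have h3 : t + (x :: l2).length = (t + 1) + l2.length := by simp; omega
    rw [List.foldl_cons, h3]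
    exact this

theorem B_best (array : List Int) (k : Int) (hk : k ≠ 0) :
    BestVal array k (in_n_cubed_alt array k) := by
  have hR0 : pvR array k 0 = 0 := by
    unfold pvR pvS
    simpa using (PySem.Int.mod_eq_zero_iff_dvd 0 k).mpr (dvd_zero k)
  have h0 : BInv array k 0 (((array.length : Int) + 1), (PySem.Dict.empty).insert 0 0, 0, 0) := by
    refine ⟨rfl, by simpa using hR0.symm, ?_, ?_, ?_⟩
    · rintro r ⟨i, hi, hRi⟩
      have hi0 : i = 0 := by omega
      subst hi0
      have hr : r = 0 := by rw [← hRi, hR0]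
      subst hr
      have hg : Nat.findGreatest (fun i => pvR array k i = 0) 0 = 0 := rfl
      simp [hg, PySem.Dict.get?_insert_self]
    · intro r hr
      have hrr : r ≠ 0 := by
        intro h
        exact hr 0 (le_refl 0) (by rw [hR0, h])
      rw [PySem.Dict.get?_insert_of_ne _ _ hrr]
      simp [PySem.Dict.get?_empty]
    · refine ⟨Or.inl rfl, le_refl _, ?_⟩
      intro i j hij hj0 _
      omega
  have hmain := bfold_inv array k hk array 0 _ rfl h0
  obtain ⟨-, -, -, -, hbest⟩ := hmain
  simp only [Nat.zero_add] at hbest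
  obtain ⟨h1, h2, h3⟩ := hbest
  show BestVal array k (array.foldl (bStep k) ((array.length : Int) + 1, (PySem.Dict.empty).insert 0 0, 0, 0)).1
  refine ⟨?_, h2, ?_⟩
  · rcases h1 with h | ⟨i, j, ha, hb, hc, he⟩
    · exact Or.inl h
    · exact Or.inr ⟨i, j, ⟨ha, hb, hc⟩, he⟩
  · rintro i j ⟨ha, hb, hc⟩
    exact h3 i j ha hb hc

-- ===== VERDICT (by name: the statement is the Claim_ definition above) =====
theorem in_n_cubed_spec : Claim_equal_in_n_cubed := by
  intro array k _ hpre
  unfold Spec_in_n_cubed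
  exact bestVal_unique array k _ _ (A_best array k hpre) (B_best array k hpre)
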